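-- pv_equiv track=rewrite | github.com/jueoneom/algorithm_study | week1/lv2_힙_더 맵게.py | solution
-- ===== SOURCE A (Python) =====
-- import heapq
-- import heapq
--
-- def solution(scoville, K):
--     answer = 0
--     heapq.heapify(scoville)
--
--     while scoville[0] < K:
--         if len(scoville) < 2:
--             return -1
--         else:
--             food1 = heapq.heappop(scoville)
--             food2 = heapq.heappop(scoville)
--             mixed = food1 + ( food2 * 2 )
--             heapq.heappush( scoville, mixed )
--             answer += 1
--     return answer
-- ===== SOURCE B (Python) =====
-- def solution(scoville, K):
--     # Sorted-list variant: sort once, pop the two smallest from the front,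
--     # reinsert the mix in order (no heap).  Mutates scoville in place like A.
--     answer = 0
--     scoville.sort()
--     while scoville[0] < K:
--         if len(scoville) < 2:
--             return -1
--         food1 = scoville.pop(0)
--         food2 = scoville.pop(0)
--         mixed = food1 + food2 * 2
--         i = 0
--         while i < len(scoville) and scoville[i] <= mixed:
--             i += 1
--         scoville.insert(i, mixed)
--         answer += 1
--     return answer
-- ===== Notes on version B (the rewrite author's own statement) =====
-- stated objective: alternative
-- what changed: Replaces the binary heap with a sorted list maintained by ordered insertion: sort once, pop the two smallest from the front, insert the mix at its sorted position; the priority invariant is held by list order instead of a heap.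
import Mathlib
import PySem

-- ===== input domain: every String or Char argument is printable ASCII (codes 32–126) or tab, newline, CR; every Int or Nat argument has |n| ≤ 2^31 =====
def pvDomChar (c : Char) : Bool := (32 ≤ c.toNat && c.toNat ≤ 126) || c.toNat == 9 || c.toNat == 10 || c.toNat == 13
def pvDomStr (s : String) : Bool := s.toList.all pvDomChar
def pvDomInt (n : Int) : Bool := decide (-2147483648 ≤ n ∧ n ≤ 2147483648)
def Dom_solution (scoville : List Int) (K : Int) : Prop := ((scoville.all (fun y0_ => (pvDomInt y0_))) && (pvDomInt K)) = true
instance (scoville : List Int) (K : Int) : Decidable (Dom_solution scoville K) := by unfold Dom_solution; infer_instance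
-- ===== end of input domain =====

-- B replaces A's binary heap by a sorted list with ordered insertion; the RETURN value is
-- proved equal. Both A and B mutate the argument in place (A heapifies, B sorts); the
-- equivalence proved here is about the return value only.
-- ===== PORT A =====
-- heapq is a library call, modelled by its contract: heap[0] is the minimum, heappop removes
-- one occurrence of the minimum, heappush adds the element; this is exact for the return
-- value, since only the heap's multiset of contents and its successive minima are observed.
-- The fuel (= the heap's length, which decreases by one per iteration) only makes the loop
-- total; it never runs out on inputs admitted by Pre_solution.
def solutionLoopA : Nat → List Int → Int → Int → Int
  | 0, _, _, _ => 0   -- fuel exhausted: unreachable (fuel = heap length at every call)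
  | fuel + 1, l, K, answer =>
    match PySem.List.min? l (fun x => x) with
    | none => 0   -- empty heap: unreachable under Pre_solution (scoville[0] would raise)
    | some food1 =>
      if food1 < K then
        if l.length < 2 then -1
        else
          match PySem.List.min? (l.erase food1) (fun x => x) with
          | none => 0   -- unreachable: l.length ≥ 2
          | some food2 =>
            solutionLoopA fuel (((l.erase food1).erase food2) ++ [food1 + food2 * 2]) K (answer + 1)
      else answer

def solution (scoville : List Int) (K : Int) : Int :=
  solutionLoopA scoville.length scoville K 0

-- ===== PORT B =====
-- ordered insertion: the inner while loop of Source B (skip the elements ≤ mixed, insert there)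
def insortLin (x : Int) : List Int → List Int
  | [] => [x]
  | a :: r => if x < a then x :: a :: r else a :: insortLin x r

-- the fuel (= list length, decreasing by one per iteration) only makes the loop total
def solutionLoopB : Nat → List Int → Int → Int → Int
  | 0, _, _, _ => 0   -- fuel exhausted: unreachable (fuel = list length at every call)
  | _ + 1, [], _, _ => 0   -- empty list: unreachable under Pre_solution
  | _ + 1, [a], K, answer => if a < K then -1 else answer
  | fuel + 1, a :: b :: r, K, answer =>
    if a < K then solutionLoopB fuel (insortLin (a + b * 2) r) K (answer + 1)
    else answer

def solution_alt (scoville : List Int) (K : Int) : Int :=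
  solutionLoopB scoville.length (PySem.List.sorted scoville (fun x => x) false) K 0

-- ===== PRECONDITION & SPEC =====
-- Pre_ excludes exactly the empty list, on which A raises IndexError (scoville[0]); B raises too.
def Pre_solution (scoville : List Int) (K : Int) : Prop := scoville ≠ []
instance (scoville : List Int) (K : Int) : Decidable (Pre_solution scoville K) := by unfold Pre_solution; infer_instance
def pvWitness_solution : List Int × Int := ([1, 2, 3, 9, 10, 12], 7)

def Spec_solution (scoville : List Int) (K : Int) (out : Int) : Prop := out = solution_alt scoville K
instance (scoville : List Int) (K : Int) (out : Int) : Decidable (Spec_solution scoville K out) := by unfold Spec_solution; infer_instance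

-- ===== CLAIM (what is proved, stated in full; the proofs are below) =====
def Claim_equal_solution : Prop := ∀ (scoville : List Int) (K : Int), Dom_solution scoville K → Pre_solution scoville K → Spec_solution scoville K (solution scoville K)

-- ===== LEMMAS AND PROOFS =====

theorem mem_insortLin {y x : Int} {s : List Int} :
    y ∈ insortLin x s ↔ y = x ∨ y ∈ s := by
  induction s with
  | nil => simp [insortLin]
  | cons a r ih =>
    simp only [insortLin]; split
    · simp
    · simp [ih]; tauto

theorem perm_insortLin (x : Int) (s : List Int) :
    (insortLin x s).Perm (x :: s) := by
  induction s with
  | nil => simp [insortLin]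
  | cons a r ih =>
    simp only [insortLin]; split
    · exact List.Perm.refl _
    · exact (ih.cons a).trans (List.Perm.swap x a r)

theorem pairwise_insortLin {x : Int} {s : List Int}
    (hs : s.Pairwise (· ≤ ·)) : (insortLin x s).Pairwise (· ≤ ·) := by
  induction s with
  | nil => simp [insortLin]
  | cons a r ih =>
    rcases List.pairwise_cons.mp hs with ⟨ha, hr⟩
    simp only [insortLin]; split
    · rename_i hlt
      refine List.pairwise_cons.mpr ⟨?_, hs⟩
      intro y hy
      rcases List.mem_cons.mp hy with rfl | hyr
      · omega
      · exact le_trans (le_of_lt hlt) (ha y hyr)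
    · rename_i hge
      refine List.pairwise_cons.mpr ⟨?_, ih hr⟩
      intro y hy
      rcases mem_insortLin.mp hy with rfl | hyr
      · omega
      · exact ha y hyr

theorem sorted_cons_min {l : List Int} {m : Int} {t : List Int}
    (h : PySem.List.sorted l (fun x => x) false = m :: t) :
    PySem.List.min? l (fun x => x) = some m := by
  cases hv : PySem.List.min? l (fun x => x) with
  | none =>
    have : l = [] := (PySem.List.min?_eq_none_iff l (fun x => x)).mp hv
    subst this
    simp [PySem.List.sorted] at h
  | some v =>
    have hvmem : v ∈ l := PySem.List.min?_mem hv
    have hmin : ∀ y ∈ l, v ≤ y := PySem.List.min?_isMin hv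
    have hmem_m : m ∈ l := by
      have : m ∈ PySem.List.sorted l (fun x => x) false := by rw [h]; simp
      exact (PySem.List.mem_sorted l (fun x => x) false m).mp this
    have hhead : ∀ y ∈ l, m ≤ y := PySem.List.key_head_sorted_le l (fun x => x) h
    have : v = m := le_antisymm (hmin m hmem_m) (hhead v hvmem)
    rw [this]

theorem sorted_erase_head {l : List Int} {m : Int} {t : List Int}
    (h : PySem.List.sorted l (fun x => x) false = m :: t) :
    PySem.List.sorted (l.erase m) (fun x => x) false = t := by
  have hperm : (PySem.List.sorted l (fun x => x) false).Perm l :=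
    PySem.List.sorted_perm l (fun x => x) false
  have hperm_e : t.Perm (l.erase m) := by
    have := hperm.erase m
    rw [h] at this
    simpa using this
  have hpw : t.Pairwise (· ≤ ·) := by
    have := PySem.List.sorted_pairwise l (fun x : Int => x)
    rw [h] at this
    exact (List.pairwise_cons.mp this).2
  exact PySem.List.sorted_id_eq_of_perm_of_pairwise _ _ hperm_e hpw

theorem sorted_append_insort (l2 : List Int) (x : Int) :
    PySem.List.sorted (l2 ++ [x]) (fun y => y) false
      = insortLin x (PySem.List.sorted l2 (fun y => y) false) := by
  apply PySem.List.sorted_id_eq_of_perm_of_pairwise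
  · have h1 : (insortLin x (PySem.List.sorted l2 (fun y => y) false)).Perm
        (x :: PySem.List.sorted l2 (fun y => y) false) := perm_insortLin _ _
    have h2 : (x :: PySem.List.sorted l2 (fun y => y) false).Perm (x :: l2) :=
      (PySem.List.sorted_perm l2 (fun y => y) false).cons x
    have h3 : (x :: l2).Perm (l2 ++ [x]) := by
      simpa using (List.perm_append_comm (l₁ := [x]) (l₂ := l2))
    exact (h1.trans h2).trans h3
  · exact pairwise_insortLin (PySem.List.sorted_pairwise l2 (fun y : Int => y))

theorem loop_agree : ∀ (fuel : Nat) (l : List Int) (K answer : Int),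
    l.length = fuel → l ≠ [] →
    solutionLoopA fuel l K answer
      = solutionLoopB fuel (PySem.List.sorted l (fun x => x) false) K answer := by
  intro fuel
  induction fuel with
  | zero => intro l K answer hlen hne; exact absurd (List.eq_nil_of_length_eq_zero hlen) hne
  | succ n ih =>
    intro l K answer hlen hne
    cases hs : PySem.List.sorted l (fun x => x) false with
    | nil => exact absurd ((PySem.List.sorted_eq_nil_iff l (fun x => x) false).mp hs) hne
    | cons m t =>
      have hmin : PySem.List.min? l (fun x => x) = some m := sorted_cons_min hs
      have hlt : l.length = t.length + 1 := by
        have := PySem.List.length_sorted l (fun x : Int => x) false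
        rw [hs] at this; simpa using this.symm
      simp only [solutionLoopA, hmin]
      by_cases hK : m < K
      · simp only [if_pos hK]
        by_cases hsmall : l.length < 2
        · have ht : t = [] := by
            cases t with
            | nil => rfl
            | cons b r => exfalso; rw [hlt] at hsmall; simp at hsmall
          subst ht
          simp [solutionLoopB, if_pos hK, hsmall]
        · simp only [if_neg hsmall]
          obtain ⟨b, r, rfl⟩ : ∃ b r, t = b :: r := by
            cases t with
            | nil => exfalso; rw [hlt] at hsmall; simp at hsmall
            | cons b r => exact ⟨b, r, rfl⟩
          have hse : PySem.List.sorted (l.erase m) (fun x => x) false = b :: r :=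
            sorted_erase_head hs
          have hmin2 : PySem.List.min? (l.erase m) (fun x => x) = some b :=
            sorted_cons_min hse
          simp only [hmin2]
          have hse2 : PySem.List.sorted ((l.erase m).erase b) (fun x => x) false = r :=
            sorted_erase_head hse
          have hmem_m : m ∈ l := PySem.List.min?_mem hmin
          have hmem_b : b ∈ l.erase m := PySem.List.min?_mem hmin2
          have hlen1 : (l.erase m).length = l.length - 1 := List.length_erase_of_mem hmem_m
          have hlen2 : ((l.erase m).erase b).length = (l.erase m).length - 1 :=
            List.length_erase_of_mem hmem_b
          have hnew : (((l.erase m).erase b) ++ [m + b * 2]).length = n := by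
            simp only [List.length_append, List.length_cons, List.length_nil, hlen2, hlen1]
            omega
          rw [ih (((l.erase m).erase b) ++ [m + b * 2]) K (answer + 1) hnew (by simp)]
          rw [sorted_append_insort, hse2]
          simp [solutionLoopB, if_pos hK]
      · simp only [if_neg hK]
        cases t with
        | nil => simp [solutionLoopB, if_neg hK]
        | cons b r => simp [solutionLoopB, if_neg hK]

-- ===== VERDICT (by name: the statement is the Claim_ definition above) =====
theorem solution_spec : Claim_equal_solution := by
  intro scoville K _hdom hpre
  unfold Spec_solution solution solution_alt
  exact loop_agree scoville.length scoville K 0 rfl hpre
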